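-- pv_equiv track=rewrite | github.com/riaz37/easy_query | backend/voice_agent/tools/navigation_tool.py | _auto_detect_data_type
-- ===== SOURCE A (Python) =====
-- def _auto_detect_data_type(column_name: str) -> str:
--     """Auto-detect data type based on column name patterns."""
--     column_name_lower = column_name.lower()
--
--     # ID and key columns
--     if any(keyword in column_name_lower for keyword in ['id', 'key', 'pk', 'primary']):
--         return "INT"
--
--     # Date and time columns
--     if any(keyword in column_name_lower for keyword in ['date', 'time', 'created', 'updated', 'modified', 'timestamp']):
--         return "DATETIME"
--
--     # Numeric columns - be more conservative with decimal vs integer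
--     if any(keyword in column_name_lower for keyword in ['count', 'number', 'quantity']):
--         return "INT"  # Counts and quantities are usually integers
--
--     # Money/currency columns - these are typically decimal
--     if any(keyword in column_name_lower for keyword in ['amount', 'price', 'cost', 'salary', 'wage', 'income', 'revenue', 'profit', 'loss']):
--         return "DECIMAL(18,2)"  # Money values need decimal precision
--
--     # Age and rating columns - these could be either
--     if any(keyword in column_name_lower for keyword in ['age', 'score', 'rating', 'level', 'grade']):
--         return "INT"  # Default to integer for these
--
--     # Boolean columns
--     if any(keyword in column_name_lower for keyword in ['is_', 'has_', 'active', 'enabled', 'valid', 'approved']):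
--         return "BIT"
--
--     # Text columns (default)
--     return "VARCHAR(255)"
-- ===== SOURCE B (Python) =====
-- # B: single left-to-right scan of the name, probing every substring of keyword
-- # length (2..9) in a keyword -> (priority, SQL type) hash table and keeping the
-- # minimum-priority hit, instead of running one substring search per keyword.
--
-- _KEYWORD_TYPES = {
--     "id": (0, "INT"), "key": (0, "INT"), "pk": (0, "INT"), "primary": (0, "INT"),
--     "date": (1, "DATETIME"), "time": (1, "DATETIME"), "created": (1, "DATETIME"),
--     "updated": (1, "DATETIME"), "modified": (1, "DATETIME"), "timestamp": (1, "DATETIME"),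
--     "count": (2, "INT"), "number": (2, "INT"), "quantity": (2, "INT"),
--     "amount": (3, "DECIMAL(18,2)"), "price": (3, "DECIMAL(18,2)"), "cost": (3, "DECIMAL(18,2)"),
--     "salary": (3, "DECIMAL(18,2)"), "wage": (3, "DECIMAL(18,2)"), "income": (3, "DECIMAL(18,2)"),
--     "revenue": (3, "DECIMAL(18,2)"), "profit": (3, "DECIMAL(18,2)"), "loss": (3, "DECIMAL(18,2)"),
--     "age": (4, "INT"), "score": (4, "INT"), "rating": (4, "INT"), "level": (4, "INT"), "grade": (4, "INT"),
--     "is_": (5, "BIT"), "has_": (5, "BIT"), "active": (5, "BIT"), "enabled": (5, "BIT"),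
--     "valid": (5, "BIT"), "approved": (5, "BIT"),
-- }
--
--
-- def _auto_detect_data_type(column_name: str) -> str:
--     name = column_name.lower()
--     best = None
--     for i in range(len(name)):
--         for length in range(2, 10):  # every keyword has length 2..9
--             hit = _KEYWORD_TYPES.get(name[i:i + length])
--             if hit is not None and (best is None or hit[0] < best[0]):
--                 best = hit
--     return best[1] if best is not None else "VARCHAR(255)"
-- ===== Notes on version B (the rewrite author's own statement) =====
-- stated objective: alternative
-- what changed: Instead of running one substring search over the name per keyword in six ordered branches, B scans the name once, looks every substring of keyword length (2..9) up in a keyword->(priority, SQL type) hash table, and returns the type of the minimum-priority hit (VARCHAR(255) if none).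
import Mathlib
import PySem

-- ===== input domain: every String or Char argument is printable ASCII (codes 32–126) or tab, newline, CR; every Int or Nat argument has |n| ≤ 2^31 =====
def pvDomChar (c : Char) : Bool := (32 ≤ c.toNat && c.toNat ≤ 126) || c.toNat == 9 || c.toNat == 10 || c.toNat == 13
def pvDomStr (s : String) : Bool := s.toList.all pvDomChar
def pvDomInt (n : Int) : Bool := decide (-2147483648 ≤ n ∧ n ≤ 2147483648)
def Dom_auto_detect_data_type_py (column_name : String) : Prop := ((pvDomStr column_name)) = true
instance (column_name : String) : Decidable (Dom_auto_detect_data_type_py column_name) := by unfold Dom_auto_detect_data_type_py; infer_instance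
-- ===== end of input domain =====

-- B scans the lowercased name once, probing every substring of keyword length (2..9)
-- in a keyword -> (priority, SQL type) table and keeping the minimum-priority hit,
-- instead of A's six ordered branches each substring-searching the name per keyword
-- (objective: alternative algorithm, same observable result).

-- ===== PORT A =====
def auto_detect_data_type_py (column_name : String) : String :=
  let column_name_lower := PySem.Str.lower column_name
  if ["id", "key", "pk", "primary"].any (fun keyword => PySem.Str.isIn keyword column_name_lower) then "INT"
  else if ["date", "time", "created", "updated", "modified", "timestamp"].any (fun keyword => PySem.Str.isIn keyword column_name_lower) then "DATETIME"
  else if ["count", "number", "quantity"].any (fun keyword => PySem.Str.isIn keyword column_name_lower) then "INT"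
  else if ["amount", "price", "cost", "salary", "wage", "income", "revenue", "profit", "loss"].any (fun keyword => PySem.Str.isIn keyword column_name_lower) then "DECIMAL(18,2)"
  else if ["age", "score", "rating", "level", "grade"].any (fun keyword => PySem.Str.isIn keyword column_name_lower) then "INT"
  else if ["is_", "has_", "active", "enabled", "valid", "approved"].any (fun keyword => PySem.Str.isIn keyword column_name_lower) then "BIT"
  else "VARCHAR(255)"

-- ===== PORT B =====
-- the module-level dict literal _KEYWORD_TYPES
def pvKeywordTypes : PySem.Dict String (Int × String) :=
  PySem.Dict.ofList
    [("id", (0, "INT")), ("key", (0, "INT")), ("pk", (0, "INT")), ("primary", (0, "INT")),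
     ("date", (1, "DATETIME")), ("time", (1, "DATETIME")), ("created", (1, "DATETIME")),
     ("updated", (1, "DATETIME")), ("modified", (1, "DATETIME")), ("timestamp", (1, "DATETIME")),
     ("count", (2, "INT")), ("number", (2, "INT")), ("quantity", (2, "INT")),
     ("amount", (3, "DECIMAL(18,2)")), ("price", (3, "DECIMAL(18,2)")), ("cost", (3, "DECIMAL(18,2)")),
     ("salary", (3, "DECIMAL(18,2)")), ("wage", (3, "DECIMAL(18,2)")), ("income", (3, "DECIMAL(18,2)")),
     ("revenue", (3, "DECIMAL(18,2)")), ("profit", (3, "DECIMAL(18,2)")), ("loss", (3, "DECIMAL(18,2)")),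
     ("age", (4, "INT")), ("score", (4, "INT")), ("rating", (4, "INT")), ("level", (4, "INT")), ("grade", (4, "INT")),
     ("is_", (5, "BIT")), ("has_", (5, "BIT")), ("active", (5, "BIT")), ("enabled", (5, "BIT")),
     ("valid", (5, "BIT")), ("approved", (5, "BIT"))]

-- 'if hit is not None and (best is None or hit[0] < best[0]): best = hit'
def pvUpd (best : Option (Int × String)) (hit? : Option (Int × String)) : Option (Int × String) :=
  match hit?, best with
  | some hit, none => some hit
  | some hit, some b => if hit.1 < b.1 then some hit else some b
  | none, _ => best

def auto_detect_data_type_py_alt (column_name : String) : String :=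
  let name := PySem.Str.lower column_name
  let best := (PySem.List.pyRange 0 (PySem.Str.len name) 1).foldl
    (fun best i => (PySem.List.pyRange 2 10 1).foldl
      (fun best length =>
        pvUpd best (pvKeywordTypes.get? (PySem.Str.slice name (some i) (some (i + length))))) best) none
  match best with
  | some b => b.2
  | none => "VARCHAR(255)"

-- ===== PRECONDITION & SPEC =====
def Spec_auto_detect_data_type_py (column_name : String) (out : String) : Prop := out = auto_detect_data_type_py_alt column_name
instance (column_name : String) (out : String) : Decidable (Spec_auto_detect_data_type_py column_name out) := by unfold Spec_auto_detect_data_type_py; infer_instance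

-- ===== CLAIM (what is proved, stated in full; the proofs are below) =====
def Claim_equal_auto_detect_data_type_py : Prop := ∀ (column_name : String), Dom_auto_detect_data_type_py column_name → Spec_auto_detect_data_type_py column_name (auto_detect_data_type_py column_name)

-- ===== LEMMAS AND PROOFS =====

-- proof-side copies of the table as plain lists
def pvPairs : List (String × (Int × String)) :=
  [("id", (0, "INT")), ("key", (0, "INT")), ("pk", (0, "INT")), ("primary", (0, "INT")),
   ("date", (1, "DATETIME")), ("time", (1, "DATETIME")), ("created", (1, "DATETIME")),
   ("updated", (1, "DATETIME")), ("modified", (1, "DATETIME")), ("timestamp", (1, "DATETIME")),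
   ("count", (2, "INT")), ("number", (2, "INT")), ("quantity", (2, "INT")),
   ("amount", (3, "DECIMAL(18,2)")), ("price", (3, "DECIMAL(18,2)")), ("cost", (3, "DECIMAL(18,2)")),
   ("salary", (3, "DECIMAL(18,2)")), ("wage", (3, "DECIMAL(18,2)")), ("income", (3, "DECIMAL(18,2)")),
   ("revenue", (3, "DECIMAL(18,2)")), ("profit", (3, "DECIMAL(18,2)")), ("loss", (3, "DECIMAL(18,2)")),
   ("age", (4, "INT")), ("score", (4, "INT")), ("rating", (4, "INT")), ("level", (4, "INT")), ("grade", (4, "INT")),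
   ("is_", (5, "BIT")), ("has_", (5, "BIT")), ("active", (5, "BIT")), ("enabled", (5, "BIT")),
   ("valid", (5, "BIT")), ("approved", (5, "BIT"))]

def pvValues : List (Int × String) :=
  [(0, "INT"), (1, "DATETIME"), (2, "INT"), (3, "DECIMAL(18,2)"), (4, "INT"), (5, "BIT")]

def pvMin' (b : Option (Int × String)) (h : Int × String) : Option (Int × String) :=
  match b with
  | none => some h
  | some bb => if h.1 < bb.1 then some h else some bb

def pvHits (name : String) : List (Int × String) :=
  (PySem.List.pyRange 0 (PySem.Str.len name) 1).flatMap
    (fun i => (PySem.List.pyRange 2 10 1).filterMap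
      (fun length => pvKeywordTypes.get? (PySem.Str.slice name (some i) (some (i + length)))))

lemma pvUpd_none (b : Option (Int × String)) : pvUpd b none = b := by
  cases b <;> rfl

lemma pvUpd_some (b : Option (Int × String)) (h : Int × String) : pvUpd b (some h) = pvMin' b h := by
  cases b <;> rfl

lemma foldl_pvUpd_filterMap (l : List Int) (f : Int → Option (Int × String)) (b : Option (Int × String)) :
    l.foldl (fun b L => pvUpd b (f L)) b = (l.filterMap f).foldl pvMin' b := by
  induction l generalizing b with
  | nil => rfl
  | cons x xs ih =>
      cases hfx : f x <;>
        simp only [List.foldl_cons, List.filterMap_cons, hfx, pvUpd_none, pvUpd_some] <;>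
        exact ih _

lemma foldl_pvMin'_flatMap (l : List Int) (g : Int → List (Int × String)) (b : Option (Int × String)) :
    l.foldl (fun b i => (g i).foldl pvMin' b) b = (l.flatMap g).foldl pvMin' b := by
  induction l generalizing b with
  | nil => rfl
  | cons x xs ih => simp [List.flatMap_cons, List.foldl_append, ih]

lemma foldl_pvMin'_spec (hs : List (Int × String)) :
    ∀ c0 : Int × String, ∃ c, hs.foldl pvMin' (some c0) = some c ∧ (c = c0 ∨ c ∈ hs) ∧
      c.1 ≤ c0.1 ∧ ∀ x ∈ hs, c.1 ≤ x.1 := by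
  induction hs with
  | nil => intro c0; exact ⟨c0, rfl, Or.inl rfl, le_refl _, by simp⟩
  | cons h t ih =>
      intro c0
      by_cases hlt : h.1 < c0.1
      · obtain ⟨c, hc, hmem, hle, hmin⟩ := ih h
        refine ⟨c, by simpa [pvMin', hlt] using hc, ?_, by omega, ?_⟩
        · rcases hmem with h1 | h1
          · exact Or.inr (by simp [h1])
          · exact Or.inr (by simp [h1])
        · intro x hx
          rcases List.mem_cons.mp hx with h1 | h1
          · subst h1; exact hle
          · exact hmin x h1
      · obtain ⟨c, hc, hmem, hle, hmin⟩ := ih c0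
        refine ⟨c, by simpa [pvMin', hlt] using hc, ?_, hle, ?_⟩
        · rcases hmem with h1 | h1
          · exact Or.inl h1
          · exact Or.inr (by simp [h1])
        · intro x hx
          rcases List.mem_cons.mp hx with h1 | h1
          · subst h1; omega
          · exact hmin x h1

lemma pvKeywordTypes_items : pvKeywordTypes.items = pvPairs := by decide

lemma pvKeywordTypes_nodup : pvKeywordTypes.keys.Nodup := by decide

-- substring of length 2..9 at some position = exactly the infix occurrences, for a keyword of length 2..9
lemma take_drop_infix (cs kw : List Char) (h2 : 2 ≤ kw.length) (h9 : kw.length ≤ 9) :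
    (∃ j : Nat, j < cs.length ∧ ∃ l : Nat, 2 ≤ l ∧ l ≤ 9 ∧ (cs.drop j).take l = kw) ↔ kw <:+: cs := by
  constructor
  · rintro ⟨j, hj, l, _, _, hk⟩
    have hpre : kw <+: cs.drop j := hk ▸ List.take_prefix l (cs.drop j)
    obtain ⟨r, hr⟩ := hpre
    exact ⟨cs.take j, r, by rw [List.append_assoc, hr, List.take_append_drop]⟩
  · rintro ⟨u, v, huv⟩
    refine ⟨u.length, ?_, kw.length, h2, h9, ?_⟩
    · subst huv; simp; omega
    · subst huv
      have : (u ++ (kw ++ v)).drop u.length = kw ++ v := by simp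
      simp only [List.append_assoc, this, List.take_left]

lemma pvPairs_len : ∀ p ∈ pvPairs, 2 ≤ p.1.toList.length ∧ p.1.toList.length ≤ 9 := by decide

lemma get?_table (k : String) (x : Int × String) :
    pvKeywordTypes.get? k = some x ↔ (k, x) ∈ pvPairs := by
  rw [← pvKeywordTypes_items]
  exact PySem.Dict.get?_eq_some_iff_mem_items _ _ _ pvKeywordTypes_nodup

lemma slice_toList (name : String) (i L : Int) (h0 : 0 ≤ i) (hL : 0 ≤ L) :
    (PySem.Str.slice name (some i) (some (i + L))).toList
      = (name.toList.drop i.toNat).take L.toNat := by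
  rw [PySem.Str.toList_slice, PySem.Chars.slice_eq_listSlice,
      PySem.List.slice_toNat _ h0 (by omega)]
  congr 1
  omega

lemma mem_pvHits_iff (name : String) (x : Int × String) :
    x ∈ pvHits name ↔ ∃ kw, (kw, x) ∈ pvPairs ∧ PySem.Str.isIn kw name = true := by
  constructor
  · intro hx
    rw [pvHits, List.mem_flatMap] at hx
    obtain ⟨i, hi, hx⟩ := hx
    rw [List.mem_filterMap] at hx
    obtain ⟨L, hL, hget⟩ := hx
    rw [PySem.List.mem_pyRange_one] at hi hL
    have hmem := (get?_table _ _).mp hget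
    have hlen := pvPairs_len _ hmem
    refine ⟨_, hmem, ?_⟩
    rw [PySem.Str.isIn_iff_infix]
    apply (take_drop_infix name.toList _ hlen.1 hlen.2).mp
    have hs := slice_toList name i L hi.1 (by omega)
    refine ⟨i.toNat, ?_, L.toNat, by omega, by omega, hs.symm⟩
    have := hi.2
    rw [PySem.Str.len_eq] at this
    omega
  · rintro ⟨kw, hmem, hin⟩
    have hlen := pvPairs_len _ hmem
    rw [PySem.Str.isIn_iff_infix] at hin
    obtain ⟨j, hj, l, hl2, hl9, heq⟩ := (take_drop_infix name.toList kw.toList hlen.1 hlen.2).mpr hin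
    rw [pvHits, List.mem_flatMap]
    refine ⟨(j : Int), ?_, ?_⟩
    · rw [PySem.List.mem_pyRange_one, PySem.Str.len_eq]
      omega
    · rw [List.mem_filterMap]
      refine ⟨(l : Int), ?_, ?_⟩
      · rw [PySem.List.mem_pyRange_one]
        omega
      · rw [get?_table]
        have hk : PySem.Str.slice name (some (j : Int)) (some ((j : Int) + (l : Int))) = kw := by
          rw [← String.toList_inj, PySem.Str.toList_slice, PySem.Chars.slice_eq_listSlice,
              PySem.List.slice_natCast_add]
          exact heq
        rw [hk]
        exact hmem

lemma mem_pvHits_values (name : String) : ∀ x ∈ pvHits name, x ∈ pvValues := by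
  intro x hx
  obtain ⟨kw, hmem, -⟩ := (mem_pvHits_iff name x).mp hx
  have h1 : x ∈ pvPairs.map Prod.snd := List.mem_map.mpr ⟨(kw, x), hmem, rfl⟩
  have h2 : ∀ y ∈ pvPairs.map Prod.snd, y ∈ pvValues := by decide
  exact h2 x h1

lemma pvValues_cases : ∀ x ∈ pvValues,
    x = ((0 : Int), "INT") ∨ x = ((1 : Int), "DATETIME") ∨ x = ((2 : Int), "INT") ∨
    x = ((3 : Int), "DECIMAL(18,2)") ∨ x = ((4 : Int), "INT") ∨ x = ((5 : Int), "BIT") := by decide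

lemma pvHits_assemble (name : String) :
    (pvHits name).foldl pvMin' none =
      if ((0 : Int), "INT") ∈ pvHits name then some ((0 : Int), "INT")
      else if ((1 : Int), "DATETIME") ∈ pvHits name then some ((1 : Int), "DATETIME")
      else if ((2 : Int), "INT") ∈ pvHits name then some ((2 : Int), "INT")
      else if ((3 : Int), "DECIMAL(18,2)") ∈ pvHits name then some ((3 : Int), "DECIMAL(18,2)")
      else if ((4 : Int), "INT") ∈ pvHits name then some ((4 : Int), "INT")
      else if ((5 : Int), "BIT") ∈ pvHits name then some ((5 : Int), "BIT")
      else none := by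
  rcases hd : pvHits name with _ | ⟨h, t⟩
  · simp
  · have hvals : ∀ x ∈ h :: t, x ∈ pvValues := hd ▸ mem_pvHits_values name
    obtain ⟨c, hc, hmemc, hlec, hminc⟩ := foldl_pvMin'_spec t h
    have hfold : (h :: t).foldl pvMin' none = some c := by
      simpa [pvMin'] using hc
    rw [hfold]
    have hcmem : c ∈ h :: t := by
      rcases hmemc with h1 | h1
      · simp [h1]
      · simp [h1]
    have hcmin : ∀ x ∈ h :: t, c.1 ≤ x.1 := by
      intro x hx
      rcases List.mem_cons.mp hx with h1 | h1
      · subst h1; exact hlec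
      · exact hminc x h1
    have hcval := hvals c hcmem
    split_ifs with m0 m1 m2 m3 m4 m5
    · have hle := hcmin _ m0
      rcases pvValues_cases c hcval with h' | h' | h' | h' | h' | h' <;> subst h'
      · rfl
      all_goals (exfalso; norm_num at hle)
    · have hle := hcmin _ m1
      rcases pvValues_cases c hcval with h' | h' | h' | h' | h' | h' <;> subst h'
      · exact absurd hcmem m0
      · rfl
      all_goals (exfalso; norm_num at hle)
    · have hle := hcmin _ m2
      rcases pvValues_cases c hcval with h' | h' | h' | h' | h' | h' <;> subst h'
      · exact absurd hcmem m0
      · exact absurd hcmem m1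
      · rfl
      all_goals (exfalso; norm_num at hle)
    · have hle := hcmin _ m3
      rcases pvValues_cases c hcval with h' | h' | h' | h' | h' | h' <;> subst h'
      · exact absurd hcmem m0
      · exact absurd hcmem m1
      · exact absurd hcmem m2
      · rfl
      all_goals (exfalso; norm_num at hle)
    · have hle := hcmin _ m4
      rcases pvValues_cases c hcval with h' | h' | h' | h' | h' | h' <;> subst h'
      · exact absurd hcmem m0
      · exact absurd hcmem m1
      · exact absurd hcmem m2
      · exact absurd hcmem m3
      · rfl
      all_goals (exfalso; norm_num at hle)
    · have hle := hcmin _ m5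
      rcases pvValues_cases c hcval with h' | h' | h' | h' | h' | h' <;> subst h'
      · exact absurd hcmem m0
      · exact absurd hcmem m1
      · exact absurd hcmem m2
      · exact absurd hcmem m3
      · exact absurd hcmem m4
      · rfl
    · exfalso
      rcases pvValues_cases c hcval with h' | h' | h' | h' | h' | h' <;> subst h'
      exacts [m0 hcmem, m1 hcmem, m2 hcmem, m3 hcmem, m4 hcmem, m5 hcmem]

lemma occ0 (name : String) : (((0 : Int), "INT") ∈ pvHits name) ↔
    (["id", "key", "pk", "primary"].any (fun keyword => PySem.Str.isIn keyword name)) = true := by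
  rw [mem_pvHits_iff]
  simp [pvPairs]

lemma occ1 (name : String) : (((1 : Int), "DATETIME") ∈ pvHits name) ↔
    (["date", "time", "created", "updated", "modified", "timestamp"].any (fun keyword => PySem.Str.isIn keyword name)) = true := by
  rw [mem_pvHits_iff]
  simp [pvPairs]

lemma occ2 (name : String) : (((2 : Int), "INT") ∈ pvHits name) ↔
    (["count", "number", "quantity"].any (fun keyword => PySem.Str.isIn keyword name)) = true := by
  rw [mem_pvHits_iff]
  simp [pvPairs]

lemma occ3 (name : String) : (((3 : Int), "DECIMAL(18,2)") ∈ pvHits name) ↔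
    (["amount", "price", "cost", "salary", "wage", "income", "revenue", "profit", "loss"].any (fun keyword => PySem.Str.isIn keyword name)) = true := by
  rw [mem_pvHits_iff]
  simp [pvPairs]

lemma occ4 (name : String) : (((4 : Int), "INT") ∈ pvHits name) ↔
    (["age", "score", "rating", "level", "grade"].any (fun keyword => PySem.Str.isIn keyword name)) = true := by
  rw [mem_pvHits_iff]
  simp [pvPairs]

lemma occ5 (name : String) : (((5 : Int), "BIT") ∈ pvHits name) ↔
    (["is_", "has_", "active", "enabled", "valid", "approved"].any (fun keyword => PySem.Str.isIn keyword name)) = true := by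
  rw [mem_pvHits_iff]
  simp [pvPairs]

lemma fold_eq_hits (name : String) :
    (PySem.List.pyRange 0 (PySem.Str.len name) 1).foldl
      (fun best i => (PySem.List.pyRange 2 10 1).foldl
        (fun best length =>
          pvUpd best (pvKeywordTypes.get? (PySem.Str.slice name (some i) (some (i + length))))) best) none
    = (pvHits name).foldl pvMin' none := by
  rw [show (fun (best : Option (Int × String)) (i : Int) => (PySem.List.pyRange 2 10 1).foldl
        (fun best length =>
          pvUpd best (pvKeywordTypes.get? (PySem.Str.slice name (some i) (some (i + length))))) best)
      = fun best i => ((PySem.List.pyRange 2 10 1).filterMap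
          (fun length => pvKeywordTypes.get? (PySem.Str.slice name (some i) (some (i + length))))).foldl pvMin' best
    from funext fun best => funext fun i => foldl_pvUpd_filterMap _ _ _]
  exact foldl_pvMin'_flatMap _ _ _

-- ===== VERDICT (by name: the statement is the Claim_ definition above) =====
theorem auto_detect_data_type_py_spec : Claim_equal_auto_detect_data_type_py := by
  intro column_name _
  unfold Spec_auto_detect_data_type_py
  simp only [auto_detect_data_type_py, auto_detect_data_type_py_alt]
  rw [fold_eq_hits, pvHits_assemble]
  simp only [occ0, occ1, occ2, occ3, occ4, occ5]
  split_ifs <;> rfl
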